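-- pv_equiv track=rewrite | github.com/cloud-py-api/nc_py_api | nc_py_api/contacts.py | _parse_vcard
-- ===== SOURCE A (Python) =====
-- from typing import Any
--
-- def _parse_vcard(vcard: str) -> dict:
--     """Parse vCard data into a dictionary."""
--     parsed: dict[str, Any] = {}
--     lines = vcard.split("\n")
--     current_key = None
--     current_value = []
--
--     for line in lines:
--         line = line.strip()
--         if not line:
--             continue
--         if line.startswith("BEGIN:VCARD") or line.startswith("END:VCARD"):
--             continue
--         if ":" in line:
--             if current_key:
--                 parsed[current_key] = "".join(current_value)
--                 current_value = []
--             parts = line.split(":", 1)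
--             current_key = parts[0].split(";")[0].replace("item", "").lower()
--             if len(parts) > 1:
--                 current_value.append(parts[1])
--         elif current_key:
--             current_value.append(line)
--
--     if current_key:
--         parsed[current_key] = "".join(current_value)
--
--     return parsed
-- ===== SOURCE B (Python) =====
-- def _parse_vcard(vcard: str) -> dict:
--     """Parse vCard data into a dictionary."""
--     # clean the lines once: strip, drop blanks and the BEGIN/END markers
--     lines = [s for s in (t.strip() for t in vcard.split("\n"))
--              if s and not s.startswith("BEGIN:VCARD") and not s.startswith("END:VCARD")]
--     parsed = {}
--     i, n = 0, len(lines)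
--     while i < n:
--         line = lines[i]
--         i += 1
--         if ":" not in line:
--             continue  # stray continuation line with no property to attach to
--         head, _, value = line.partition(":")
--         key = head.split(";")[0].replace("item", "").lower()
--         if not key:
--             continue  # a property line without a name carries nothing
--         while i < n and ":" not in lines[i]:
--             value += lines[i]
--             i += 1
--         parsed[key] = value
--     return parsed
-- ===== Notes on version B (the rewrite author's own statement) =====
-- stated objective: alternative
-- what changed: A's flush-on-next-key state machine (dict + current_key + current_value mutated line by line, flushed when the next colon-bearing line or the end arrives) is replaced by an index-based scanner: clean the lines once, then each named colon-bearing line greedily consumes its continuation lines with an inner scan and is stored as a complete entry immediately; …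
-- outside the precondition, e.g. on _parse_vcard(':x\nN:y'): A returns {'n': 'xy'}, B returns {'n': 'y'}; on _parse_vcard('item;x:1\nTEL:5'): A returns {'tel': '15'}, B returns {'tel': '5'}
import Mathlib
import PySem

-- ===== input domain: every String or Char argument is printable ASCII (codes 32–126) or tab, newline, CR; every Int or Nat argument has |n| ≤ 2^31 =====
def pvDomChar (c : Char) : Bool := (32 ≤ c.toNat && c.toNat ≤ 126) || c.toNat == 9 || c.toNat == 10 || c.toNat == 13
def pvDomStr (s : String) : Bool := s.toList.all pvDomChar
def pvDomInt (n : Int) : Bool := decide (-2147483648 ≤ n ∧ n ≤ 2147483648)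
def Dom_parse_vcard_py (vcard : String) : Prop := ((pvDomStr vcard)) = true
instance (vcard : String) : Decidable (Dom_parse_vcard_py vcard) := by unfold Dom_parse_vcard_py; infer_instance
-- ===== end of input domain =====

-- B replaces A's flush-on-next-key state machine by an index-based scanner that stores each
-- named property line, with its greedily consumed continuation lines, immediately (objective:
-- alternative). Pre_ excludes vCards with a nameless colon-bearing line carrying text before a later
-- named property line — unspecified content on which A folds that text into the next named
-- property's value while B ignores the nameless line.


-- ===== PORT A =====
def pvBEGIN : List Char := "BEGIN:VCARD".toList
def pvEND : List Char := "END:VCARD".toList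
-- Python truthiness of `current_key` (None or "" are falsy)
def pvTruthy : Option (List Char) → Bool
  | none => false
  | some s => !s.isEmpty

-- the normalised key: parts[0].split(";")[0].replace("item", "").lower()
def pvKeyOf (head : List Char) : List Char :=
  PySem.Chars.lower (PySem.Chars.replace ((PySem.Chars.splitOn head [';']).getD 0 []) "item".toList [])

-- one iteration of A's `for line in lines` loop over the state (parsed, current_key, current_value)
def pvALine (st : PySem.Dict (List Char) (List Char) × Option (List Char) × List (List Char))
    (rawLine : List Char) :
    PySem.Dict (List Char) (List Char) × Option (List Char) × List (List Char) :=
  let line := PySem.Chars.strip rawLine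
  if line.isEmpty then st
  else if PySem.Chars.startswith line pvBEGIN
       || PySem.Chars.startswith line pvEND then st
  else if PySem.Chars.isIn [':'] line then
    match st with
    | (parsed, currentKey, currentValue) =>
      let (parsed, currentValue) :=
        if pvTruthy currentKey then
          (parsed.insert (currentKey.getD []) (PySem.Chars.join [] currentValue), [])
        else (parsed, currentValue)
      let parts := PySem.Chars.splitOnMax line [':'] 1
      let currentKey := pvKeyOf (parts.getD 0 [])
      let currentValue :=
        if parts.length > 1 then currentValue ++ [parts.getD 1 []] else currentValue
      (parsed, some currentKey, currentValue)
  else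
    match st with
    | (parsed, currentKey, currentValue) =>
      if pvTruthy currentKey then (parsed, currentKey, currentValue ++ [rawLine |> PySem.Chars.strip])
      else st

def parse_vcard_py (vcard : String) : List (String × String) :=
  let lines := PySem.Chars.splitOn vcard.toList ['\n']
  let st := lines.foldl pvALine (PySem.Dict.empty, none, [])
  let parsed :=
    if pvTruthy st.2.1 then
      st.1.insert (st.2.1.getD []) (PySem.Chars.join [] st.2.2)
    else st.1
  parsed.items.map (fun p => (String.ofList p.1, String.ofList p.2))

-- ===== PORT B =====
-- keep non-empty lines that are not BEGIN:VCARD/END:VCARD markers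
def pvKeep (ln : List Char) : Bool :=
  !ln.isEmpty && !PySem.Chars.startswith ln pvBEGIN
             && !PySem.Chars.startswith ln pvEND
-- `":" in line`
def pvIsColon (l : List Char) : Bool := PySem.Chars.isIn [':'] l

-- B's outer while loop over the cleaned lines: a named ':' line consumes its continuation
-- lines with the inner while (takeWhile/dropWhile) and is stored at once; other lines are skipped
def pvBGo (d : PySem.Dict (List Char) (List Char)) : List (List Char) → PySem.Dict (List Char) (List Char)
  | [] => d
  | l :: rest =>
    if pvIsColon l then
      let parts := PySem.Chars.splitOnMax l [':'] 1   -- line.partition(":")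
      let key := pvKeyOf (parts.getD 0 [])
      if key.isEmpty then pvBGo d rest
      else
        pvBGo (d.insert key ((rest.takeWhile (fun x => !pvIsColon x)).foldl (· ++ ·) (parts.getD 1 [])))
              (rest.dropWhile (fun x => !pvIsColon x))
    else pvBGo d rest
  termination_by ls => ls.length
  decreasing_by
  all_goals (have := List.length_dropWhile_le (fun x => !pvIsColon x) rest; simp; try omega)

def parse_vcard_py_alt (vcard : String) : List (String × String) :=
  let lines := ((PySem.Chars.splitOn vcard.toList ['\n']).map PySem.Chars.strip).filter pvKeep
  (pvBGo PySem.Dict.empty lines).items.map (fun p => (String.ofList p.1, String.ofList p.2))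

-- ===== PRECONDITION & SPEC =====
-- Pre_ excludes vCards in which a nameless property line (a line with text after its colon
-- but an empty normalised name, e.g. ':x' or 'item:x') precedes a later named property line:
-- the vCard grammar does not cover nameless property lines, and on them A folds the nameless
-- line's text into the next named property's value while B ignores the nameless line — an
-- unspecified corner where neither value is canonical.
def pvHead (l : List Char) : List Char := l.takeWhile (fun c => c ≠ ':')
def pvAfter (l : List Char) : Nat := (l.dropWhile (fun c => c ≠ ':')).length

def Pre_parse_vcard_py (vcard : String) : Prop :=
  let ls := List.filter
    (fun s => !PySem.Chars.startswith s pvEND &&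
              !PySem.Chars.startswith s pvBEGIN && !s.isEmpty)
    (List.map PySem.Chars.strip (PySem.Chars.splitOn (String.toList vcard) ['\n']))
  ¬ ∃ i < ls.length, ∃ j < ls.length,
    i < j ∧
    1 < pvAfter (ls.getD i []) ∧
    pvKeyOf (pvHead (ls.getD i [])) = [] ∧
    0 < pvAfter (ls.getD j []) ∧
    pvKeyOf (pvHead (ls.getD j [])) ≠ []
instance (vcard : String) : Decidable (Pre_parse_vcard_py vcard) := by unfold Pre_parse_vcard_py; infer_instance

def pvWitness_parse_vcard_py : String := "BEGIN:VCARD\nFN:John Doe\nEND:VCARD"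

def Spec_parse_vcard_py (vcard : String) (out : List (String × String)) : Prop := out = parse_vcard_py_alt vcard
instance (vcard : String) (out : List (String × String)) : Decidable (Spec_parse_vcard_py vcard out) := by unfold Spec_parse_vcard_py; infer_instance

-- ===== CLAIM (what is proved, stated in full; the proofs are below) =====
def Claim_equal_parse_vcard_py : Prop := ∀ (vcard : String), Dom_parse_vcard_py vcard → Pre_parse_vcard_py vcard → Spec_parse_vcard_py vcard (parse_vcard_py vcard)

-- ===== LEMMAS AND PROOFS =====

-- proof-side characterisation of the change region as a left-to-right scan
def pvKeyed (l : List Char) : Bool :=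
  PySem.Chars.isIn [':'] l && !(pvKeyOf ((PySem.Chars.splitOnMax l [':'] 1).getD 0 [])).isEmpty

def pvEmptyKeyLeak : List (List Char) → Bool
  | [] => false
  | l :: rest =>
    (PySem.Chars.isIn [':'] l
      && (pvKeyOf ((PySem.Chars.splitOnMax l [':'] 1).getD 0 [])).isEmpty
      && !((PySem.Chars.splitOnMax l [':'] 1).getD 1 []).isEmpty
      && rest.any pvKeyed)
    || pvEmptyKeyLeak rest

theorem pvGoM0 (fuel : Nat) (l cur : List Char) (acc : List (List Char)) :
    PySem.Chars.splitOnMax.go [':'] fuel 0 l cur acc = ((cur.reverse ++ l) :: acc).reverse := by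
  cases fuel with
  | zero => rfl
  | succ f => cases l with
    | nil => simp [PySem.Chars.splitOnMax.go]
    | cons c rest => simp [PySem.Chars.splitOnMax.go]

theorem pvGo1 (l : List Char) : ∀ (fuel : Nat) (cur : List Char) (acc : List (List Char)),
    l.length < fuel →
    PySem.Chars.splitOnMax.go [':'] fuel 1 l cur acc =
      if ':' ∈ l then
        acc.reverse ++ [cur.reverse ++ l.takeWhile (fun c => c ≠ ':'), (l.dropWhile (fun c => c ≠ ':')).tail]
      else acc.reverse ++ [cur.reverse ++ l] := by
  induction l with
  | nil =>
    intro fuel cur acc h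
    cases fuel with
    | zero => omega
    | succ f => simp [PySem.Chars.splitOnMax.go]
  | cons c rest ih =>
    intro fuel cur acc h
    cases fuel with
    | zero => omega
    | succ f =>
      by_cases hc : c = ':'
      · subst hc
        have hpre : List.isPrefixOf [':'] (':' :: rest) = true := by simp [List.isPrefixOf]
        simp only [PySem.Chars.splitOnMax.go, hpre, if_true]
        rw [show (1 : Nat) - 1 = 0 from rfl]
        rw [pvGoM0]
        simp [List.takeWhile, List.dropWhile]
      · have hpre : List.isPrefixOf [':'] (c :: rest) = false := by
          simp [List.isPrefixOf]; exact fun h' => hc h'.symm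
        have hstep : PySem.Chars.splitOnMax.go [':'] (f + 1) 1 (c :: rest) cur acc
            = PySem.Chars.splitOnMax.go [':'] f 1 rest (c :: cur) acc := by
          conv_lhs => rw [PySem.Chars.splitOnMax.go]
          simp [hpre]
        rw [hstep, ih f (c :: cur) acc (by simpa using h)]
        by_cases hm : ':' ∈ rest
        · simp [hm, hc]
        · simp [hm, Ne.symm hc]

theorem pvSplit_colon (l : List Char) (h : ':' ∈ l) :
    PySem.Chars.splitOnMax l [':'] 1 =
      [l.takeWhile (fun c => c ≠ ':'), (l.dropWhile (fun c => c ≠ ':')).tail] := by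
  have : ¬ ((1 : Int) < 0) := by omega
  simp only [PySem.Chars.splitOnMax, if_neg this]
  rw [show ((1 : Int)).toNat = 1 from rfl, pvGo1 l (l.length + 1) [] [] (by omega)]
  simp [h]

theorem pvIsIn_colon (l : List Char) : PySem.Chars.isIn [':'] l = true ↔ ':' ∈ l := by
  rw [PySem.Chars.isIn_iff_infix]
  constructor
  · rintro ⟨s, t, rfl⟩; simp
  · intro h
    obtain ⟨s, t, rfl⟩ := List.append_of_mem h
    exact ⟨s, t, by simp⟩

theorem pvFilter_keep (X : List (List Char)) :
    X.filter pvKeep = X.filter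
      (fun s => !PySem.Chars.startswith s pvEND &&
                !PySem.Chars.startswith s pvBEGIN && !s.isEmpty) := by
  apply List.filter_congr
  intro x _
  unfold pvKeep
  cases x.isEmpty <;> cases PySem.Chars.startswith x pvBEGIN <;>
    cases PySem.Chars.startswith x pvEND <;> rfl

theorem pvLeak_exists (ls : List (List Char)) (h : pvEmptyKeyLeak ls = true) :
    ∃ i < ls.length, ∃ j < ls.length, i < j ∧
      1 < pvAfter (ls.getD i []) ∧ pvKeyOf (pvHead (ls.getD i [])) = [] ∧
      0 < pvAfter (ls.getD j []) ∧ pvKeyOf (pvHead (ls.getD j [])) ≠ [] := by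
  induction ls with
  | nil => simp [pvEmptyKeyLeak] at h
  | cons l rest ih =>
    simp only [pvEmptyKeyLeak, Bool.or_eq_true] at h
    rcases h with h | h
    · simp only [Bool.and_eq_true] at h
      obtain ⟨⟨⟨hcol, hkey⟩, htail⟩, hany⟩ := h
      have hm : ':' ∈ l := (pvIsIn_colon l).mp hcol
      have hsp := pvSplit_colon l hm
      obtain ⟨x, hx, hkx⟩ := List.any_eq_true.mp hany
      obtain ⟨idx, hidx, hget⟩ := List.mem_iff_getElem.mp hx
      refine ⟨0, by simp, idx + 1, by simpa using hidx, by omega, ?_, ?_, ?_, ?_⟩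
      · -- 1 < pvAfter l
        simp only [List.getD_cons_zero, pvAfter]
        rw [hsp] at htail
        simp only [List.getD] at htail
        have hdw : l.dropWhile (fun c => c ≠ ':') ≠ [] := by
          intro hnil
          have := (List.dropWhile_eq_nil_iff).mp hnil
          simpa using this ':' hm
        cases hd : l.dropWhile (fun c => c ≠ ':') with
        | nil => exact absurd hd hdw
        | cons a b =>
          rw [hd] at htail
          simp at htail
          have : b ≠ [] := by simpa [List.isEmpty_iff] using htail
          have : 0 < b.length := List.length_pos_iff.mpr this
          simp; omega
      · simp only [List.getD_cons_zero]
        rw [hsp] at hkey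
        simpa [List.isEmpty_iff, pvHead] using hkey
      · simp only [List.getD_cons_succ]
        unfold pvKeyed at hkx
        simp only [Bool.and_eq_true] at hkx
        have hmx : ':' ∈ x := (pvIsIn_colon x).mp hkx.1
        have : List.getD rest idx [] = x := by
          rw [List.getD_eq_getElem rest [] hidx, hget]
        rw [this]
        simp only [pvAfter]
        have hdw : x.dropWhile (fun c => c ≠ ':') ≠ [] := by
          intro hnil
          have := (List.dropWhile_eq_nil_iff).mp hnil
          simpa using this ':' hmx
        have := List.length_pos_iff.mpr hdw
        omega
      · simp only [List.getD_cons_succ]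
        unfold pvKeyed at hkx
        simp only [Bool.and_eq_true] at hkx
        have hmx : ':' ∈ x := (pvIsIn_colon x).mp hkx.1
        have hg : List.getD rest idx [] = x := by
          rw [List.getD_eq_getElem rest [] hidx, hget]
        rw [hg]
        have := hkx.2
        rw [pvSplit_colon x hmx] at this
        simpa [List.isEmpty_iff, pvHead] using this
    · obtain ⟨i, hi, j, hj, hij, h1, h2, h3, h4⟩ := ih h
      exact ⟨i + 1, by simpa using hi, j + 1, by simpa using hj, by omega, by simpa using h1,
        by simpa using h2, by simpa using h3, by simpa using h4⟩


-- A's final flush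
def pvFinal (st : PySem.Dict (List Char) (List Char) × Option (List Char) × List (List Char)) :
    PySem.Dict (List Char) (List Char) :=
  if pvTruthy st.2.1 then st.1.insert (st.2.1.getD []) (PySem.Chars.join [] st.2.2) else st.1

theorem pvJoin_flatten (v : List (List Char)) : PySem.Chars.join [] v = v.flatten := by
  simp [PySem.Chars.join, List.intercalate]
  induction v with
  | nil => rfl
  | cons x xs ih => cases xs <;> simp_all [List.intersperse]

theorem pvFoldlAppend (xs : List (List Char)) (a : List Char) :
    xs.foldl (· ++ ·) a = a ++ xs.flatten := by
  induction xs generalizing a with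
  | nil => simp
  | cons x xs ih => simp [ih, List.append_assoc]

-- A's takes-the-stripped-line core step on an already clean line
def pvACore (st : PySem.Dict (List Char) (List Char) × Option (List Char) × List (List Char))
    (line : List Char) :
    PySem.Dict (List Char) (List Char) × Option (List Char) × List (List Char) :=
  if PySem.Chars.isIn [':'] line then
    match st with
    | (parsed, currentKey, currentValue) =>
      let (parsed, currentValue) :=
        if pvTruthy currentKey then
          (parsed.insert (currentKey.getD []) (PySem.Chars.join [] currentValue), [])
        else (parsed, currentValue)
      let parts := PySem.Chars.splitOnMax line [':'] 1
      let currentKey := pvKeyOf (parts.getD 0 [])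
      let currentValue :=
        if parts.length > 1 then currentValue ++ [parts.getD 1 []] else currentValue
      (parsed, some currentKey, currentValue)
  else
    match st with
    | (parsed, currentKey, currentValue) =>
      if pvTruthy currentKey then (parsed, currentKey, currentValue ++ [line])
      else st

theorem pvALine_eq (st : PySem.Dict (List Char) (List Char) × Option (List Char) × List (List Char))
    (rawLine : List Char) :
    pvALine st rawLine =
      if pvKeep (PySem.Chars.strip rawLine) then pvACore st (PySem.Chars.strip rawLine) else st := by
  obtain ⟨d, k, v⟩ := st
  simp only [pvALine, pvACore, pvKeep]
  by_cases h1 : (PySem.Chars.strip rawLine).isEmpty <;>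
    by_cases h2 : PySem.Chars.startswith (PySem.Chars.strip rawLine) pvBEGIN <;>
    by_cases h3 : PySem.Chars.startswith (PySem.Chars.strip rawLine) pvEND <;>
    simp [h1, h2, h3]

theorem pvFoldl_clean (lines : List (List Char))
    (st : PySem.Dict (List Char) (List Char) × Option (List Char) × List (List Char)) :
    lines.foldl pvALine st = ((lines.map PySem.Chars.strip).filter pvKeep).foldl pvACore st := by
  induction lines generalizing st with
  | nil => rfl
  | cons l ls ih =>
    simp only [List.foldl_cons, List.map_cons, List.filter_cons, pvALine_eq]
    by_cases h : pvKeep (PySem.Chars.strip l) <;> simp [h, ih]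

-- the value A accumulates on a ':' line, seen through flatten
theorem pvAppendTail_flatten (v : List (List Char)) (parts : List (List Char)) :
    (if parts.length > 1 then v ++ [parts.getD 1 []] else v).flatten
      = v.flatten ++ parts.getD 1 [] := by
  by_cases h : parts.length > 1
  · simp [h]
  · have h1 : parts.getD 1 [] = [] := List.getD_eq_default _ _ (by omega)
    rw [if_neg h, h1]
    simp

-- the main simulation: A's fold from a falsy-key state with no pending value (or with no named
-- line left to leak into), and from a truthy-key state, both compute B's scanner result
theorem pvMain (ls : List (List Char)) :
    (∀ (d : PySem.Dict (List Char) (List Char)) (k0 : Option (List Char)) (v : List (List Char)),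
        pvTruthy k0 = false →
        (v.flatten = [] ∨ ls.all (fun x => !pvKeyed x) = true) →
        pvEmptyKeyLeak ls = false →
        pvFinal (ls.foldl pvACore (d, k0, v)) = pvBGo d ls)
  ∧ (∀ (d : PySem.Dict (List Char) (List Char)) (k : List Char) (v : List (List Char)),
        k ≠ [] →
        pvEmptyKeyLeak ls = false →
        pvFinal (ls.foldl pvACore (d, some k, v)) =
          pvBGo (d.insert k ((v ++ ls.takeWhile (fun x => !pvIsColon x)).flatten))
                (ls.dropWhile (fun x => !pvIsColon x))) := by
  induction ls with
  | nil =>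
    constructor
    · intro d k0 v hk _ _
      simp [pvFinal, pvBGo, hk]
    · intro d k v hk _
      simp [pvFinal, pvBGo, pvTruthy, hk, pvJoin_flatten]
  | cons l rest ih =>
    constructor
    · intro d k0 v hk hv hleak
      simp only [pvEmptyKeyLeak, Bool.or_eq_false_iff] at hleak
      obtain ⟨hc1, hc2⟩ := hleak
      by_cases hcol : PySem.Chars.isIn [':'] l = true
      · have hcol' : pvIsColon l = true := hcol
        simp only [List.foldl_cons, pvACore, hcol, if_true, hk, Bool.false_eq_true, if_false]
        by_cases hkey : pvKeyOf ((PySem.Chars.splitOnMax l [':'] 1).getD 0 []) = []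
        · have hkeyE : (pvKeyOf ((PySem.Chars.splitOnMax l [':'] 1).getD 0 [])).isEmpty = true := by
            rw [List.isEmpty_iff]; exact hkey
          have hB : pvBGo d (l :: rest) = pvBGo d rest := by
            simp only [pvBGo, hcol', hkeyE, if_true]
          rw [hB]
          apply ih.1 _ (some _) _ (by simp [pvTruthy]; exact hkey)
          · simp only [hcol, hkeyE, Bool.true_and, Bool.and_eq_false_iff,
              Bool.not_eq_false'] at hc1
            rcases hv with hvf | hall
            · rcases hc1 with ht | hany
              · left
                rw [pvAppendTail_flatten, hvf]
                simp only [List.nil_append]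
                exact List.isEmpty_iff.mp ht
              · right
                simp only [List.all_eq_true, List.any_eq_false] at hany ⊢
                intro x hx; simp [hany x hx]
            · right
              simp only [List.all_cons, Bool.and_eq_true] at hall
              exact hall.2
          · exact hc2
        · have hkeyE : (pvKeyOf ((PySem.Chars.splitOnMax l [':'] 1).getD 0 [])).isEmpty = false := by
            simp only [List.isEmpty_eq_false_iff]; exact hkey
          have hvf : v.flatten = [] := by
            rcases hv with h | h
            · exact h
            · exfalso
              simp only [List.all_cons, Bool.and_eq_true] at h
              have h1 := h.1
              simp only [pvKeyed, hcol, hkeyE, Bool.not_false, Bool.and_true, Bool.not_true] at h1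
              exact absurd h1 (by simp)
          have hB : pvBGo d (l :: rest) =
              pvBGo (d.insert (pvKeyOf ((PySem.Chars.splitOnMax l [':'] 1).getD 0 []))
                      ((rest.takeWhile (fun x => !pvIsColon x)).foldl (· ++ ·)
                        ((PySem.Chars.splitOnMax l [':'] 1).getD 1 [])))
                    (rest.dropWhile (fun x => !pvIsColon x)) := by
            simp only [pvBGo, hcol', hkeyE, if_true, Bool.false_eq_true, if_false]
          rw [hB, ih.2 _ _ _ hkey hc2]
          congr 2
          by_cases hlen : (PySem.Chars.splitOnMax l [':'] 1).length > 1
          · simp [hlen, pvFoldlAppend, hvf]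
          · simp [hlen, pvFoldlAppend, hvf]
      · have hcol' : pvIsColon l = false := by simpa [pvIsColon] using hcol
        have hA : pvACore (d, k0, v) l = (d, k0, v) := by
          simp [pvACore, hcol, hk]
        have hB : pvBGo d (l :: rest) = pvBGo d rest := by
          simp only [pvBGo, hcol', Bool.false_eq_true, if_false]
        simp only [List.foldl_cons, hA]
        rw [hB]
        apply ih.1 _ _ _ hk
        · rcases hv with h | h
          · exact Or.inl h
          · simp only [List.all_cons, Bool.and_eq_true] at h
            exact Or.inr h.2
        · exact hc2
    · intro d k v hk hleak
      simp only [pvEmptyKeyLeak, Bool.or_eq_false_iff] at hleak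
      obtain ⟨hc1, hc2⟩ := hleak
      have htr : pvTruthy (some k) = true := by
        simp [pvTruthy, hk]
      by_cases hcol : PySem.Chars.isIn [':'] l = true
      · have hcol' : pvIsColon l = true := hcol
        have hp : (fun x => !pvIsColon x) l = false := by simp [pvIsColon, hcol]
        simp only [List.foldl_cons, pvACore, hcol, if_true, htr, List.takeWhile_cons, hp,
          Bool.false_eq_true, if_false, List.dropWhile_cons, List.append_nil, Option.getD_some,
          pvJoin_flatten]
        by_cases hkey : pvKeyOf ((PySem.Chars.splitOnMax l [':'] 1).getD 0 []) = []
        · have hkeyE : (pvKeyOf ((PySem.Chars.splitOnMax l [':'] 1).getD 0 [])).isEmpty = true := by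
            rw [List.isEmpty_iff]; exact hkey
          have hB : pvBGo (d.insert k v.flatten) (l :: rest) = pvBGo (d.insert k v.flatten) rest := by
            simp only [pvBGo, hcol', hkeyE, if_true]
          rw [hB]
          apply ih.1 _ (some _) _ (by simp [pvTruthy]; exact hkey)
          · simp only [hcol, hkeyE, Bool.true_and, Bool.and_eq_false_iff,
              Bool.not_eq_false'] at hc1
            rcases hc1 with ht | hany
            · left
              rw [pvAppendTail_flatten ([] : List (List Char))]
              simp only [List.flatten_nil, List.nil_append]
              exact List.isEmpty_iff.mp ht
            · right
              simp only [List.all_eq_true, List.any_eq_false] at hany ⊢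
              intro x hx; simp [hany x hx]
          · exact hc2
        · have hkeyE : (pvKeyOf ((PySem.Chars.splitOnMax l [':'] 1).getD 0 [])).isEmpty = false := by
            simp only [List.isEmpty_eq_false_iff]; exact hkey
          have hB : pvBGo (d.insert k v.flatten) (l :: rest) =
              pvBGo ((d.insert k v.flatten).insert
                      (pvKeyOf ((PySem.Chars.splitOnMax l [':'] 1).getD 0 []))
                      ((rest.takeWhile (fun x => !pvIsColon x)).foldl (· ++ ·)
                        ((PySem.Chars.splitOnMax l [':'] 1).getD 1 [])))
                    (rest.dropWhile (fun x => !pvIsColon x)) := by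
            simp only [pvBGo, hcol', hkeyE, if_true, Bool.false_eq_true, if_false]
          rw [hB, ih.2 _ _ _ hkey hc2]
          congr 2
          by_cases hlen : (PySem.Chars.splitOnMax l [':'] 1).length > 1
          · simp [hlen, pvFoldlAppend]
          · simp [hlen, pvFoldlAppend]
      · have hp : (fun x => !pvIsColon x) l = true := by simp [pvIsColon, hcol]
        have hA : pvACore (d, some k, v) l = (d, some k, v ++ [l]) := by
          simp [pvACore, hcol, htr]
        simp only [List.foldl_cons, hA, List.takeWhile_cons, hp, if_true, List.dropWhile_cons]
        rw [ih.2 _ _ _ hk hc2]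
        rw [show (v ++ [l] ++ rest.takeWhile (fun x => !pvIsColon x)).flatten
            = (v ++ l :: rest.takeWhile (fun x => !pvIsColon x)).flatten from by simp]

-- ===== VERDICT (by name: the statement is the Claim_ definition above) =====
theorem parse_vcard_py_spec : Claim_equal_parse_vcard_py := by
  intro vcard _ hpre
  have hleak : pvEmptyKeyLeak
      (((PySem.Chars.splitOn vcard.toList ['\n']).map PySem.Chars.strip).filter pvKeep) = false := by
    cases hcase : pvEmptyKeyLeak
        (((PySem.Chars.splitOn vcard.toList ['\n']).map PySem.Chars.strip).filter pvKeep) with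
    | false => rfl
    | true =>
      rw [pvFilter_keep] at hcase
      exact absurd (pvLeak_exists _ hcase) hpre
  have h := (pvMain (((PySem.Chars.splitOn vcard.toList ['\n']).map PySem.Chars.strip).filter pvKeep)).1
    PySem.Dict.empty none [] rfl (Or.inl rfl) hleak
  simp only [pvFinal] at h
  unfold Spec_parse_vcard_py parse_vcard_py parse_vcard_py_alt
  simp only [pvFoldl_clean]
  rw [h]
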